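-- pv_equiv track=rewrite | github.com/MJ10/verifiers | verifiers/envs/autumn_env.py | get_action_map
-- ===== SOURCE A (Python) =====
-- def get_action_map(grid_size: int):
--     acts = []
--     acts = ["left", "right", "up", "down"]
--     for i in range(grid_size):
--         for j in range(grid_size):
--             acts.append(f"click {i} {j}")
--     acts.append("NOP")
--     return {i: act for i, act in enumerate(acts)}
-- ===== SOURCE B (Python) =====
-- def get_action_map(grid_size: int):
--     if grid_size < 0:
--         raise ValueError("grid_size must be non-negative")
--     dirs = ["left", "right", "up", "down"]
--     total = 4 + grid_size * grid_size + 1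
--
--     def act(idx):
--         if idx < 4:
--             return dirs[idx]
--         if idx == total - 1:
--             return "NOP"
--         i, j = divmod(idx - 4, grid_size)
--         return f"click {i} {j}"
--
--     return {idx: act(idx) for idx in range(total)}
-- ===== Notes on version B (the rewrite author's own statement) =====
-- stated objective: alternative
-- what changed: B computes each dict entry directly from the flat index in one pass over the whole index range, recovering click coordinates by divmod, instead of building a list with nested loops and enumerating it; Pre_ restricts to the natural domain of nonnegative grid sizes (a negative grid size is meaningless: A's five-entry result there is an accident of range() yielding nothing, while B validates and raises ValueError).
-- outside the precondition, e.g. on get_action_map(-1): A returns {0: 'left', 1: 'right', 2: 'up', 3: 'down', 4: 'NOP'}, B raises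
import Mathlib
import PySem

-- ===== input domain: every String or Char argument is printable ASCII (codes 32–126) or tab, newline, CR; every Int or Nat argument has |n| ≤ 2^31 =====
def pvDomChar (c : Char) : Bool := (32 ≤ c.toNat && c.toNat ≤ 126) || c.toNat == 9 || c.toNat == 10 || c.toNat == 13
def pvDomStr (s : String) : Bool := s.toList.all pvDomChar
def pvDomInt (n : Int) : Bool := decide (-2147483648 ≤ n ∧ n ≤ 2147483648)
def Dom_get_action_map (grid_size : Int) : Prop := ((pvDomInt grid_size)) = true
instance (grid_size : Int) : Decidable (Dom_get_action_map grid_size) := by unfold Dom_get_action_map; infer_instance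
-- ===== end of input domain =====

-- B builds the same index→action dict in one flat pass, computing each entry directly from the
-- flat index by divmod (alternative decomposition; no speed claim).

-- ===== PORT A =====
-- A builds the action list with nested loops, then turns enumerate(acts) into a dict;
-- the enumerate keys are distinct, so the dict's items are exactly the enumerate list.
def get_action_map (grid_size : Int) : List (Int × String) :=
  let acts : List String := ["left", "right", "up", "down"]
  let acts := (PySem.List.pyRange 0 grid_size 1).foldl (fun acc i =>
      (PySem.List.pyRange 0 grid_size 1).foldl (fun acc2 j =>
        acc2 ++ ["click " ++ PySem.Int.toStr i ++ " " ++ PySem.Int.toStr j]) acc) acts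
  let acts := acts ++ ["NOP"]
  PySem.List.enumerate acts 0

-- ===== PORT B =====
-- one flat pass over range(total); `dirs[idx]` is in range when taken (idx < 4 from range),
-- and divmod's divisor grid_size is nonzero whenever that branch is reached,
-- so pyGetD/floordiv/mod are exact here. The leading guard is Source B's `raise ValueError`
-- on a negative grid size (outside Pre_, where nothing is claimed): the port returns [].
def get_action_map_alt (grid_size : Int) : List (Int × String) :=
  if grid_size < 0 then [] else
  let total : Int := 4 + grid_size * grid_size + 1
  let dirs : List String := ["left", "right", "up", "down"]
  let act : Int → String := fun idx =>
    if idx < 4 then PySem.List.pyGetD dirs idx ""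
    else if idx = total - 1 then "NOP"
    else "click " ++ PySem.Int.toStr (PySem.Int.floordiv (idx - 4) grid_size) ++ " "
           ++ PySem.Int.toStr (PySem.Int.mod (idx - 4) grid_size)
  (PySem.List.pyRange 0 total 1).map (fun idx => (idx, act idx))

-- ===== PRECONDITION & SPEC =====
-- Pre_ restricts to the natural domain grid_size ≥ 0: a negative grid size is meaningless;
-- A's five-entry result there is an accident of range() over a negative bound yielding
-- nothing, while B validates its input and raises ValueError.
def Pre_get_action_map (grid_size : Int) : Prop := 0 ≤ grid_size
instance (grid_size : Int) : Decidable (Pre_get_action_map grid_size) := by unfold Pre_get_action_map; infer_instance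
def pvWitness_get_action_map : Int := 3

def Spec_get_action_map (grid_size : Int) (out : List (Int × String)) : Prop := out = get_action_map_alt grid_size
instance (grid_size : Int) (out : List (Int × String)) : Decidable (Spec_get_action_map grid_size out) := by unfold Spec_get_action_map; infer_instance

-- ===== CLAIM (what is proved, stated in full; the proofs are below) =====
def Claim_equal_get_action_map : Prop := ∀ (grid_size : Int), Dom_get_action_map grid_size → Pre_get_action_map grid_size → Spec_get_action_map grid_size (get_action_map grid_size)

-- ===== LEMMAS AND PROOFS =====

-- abbreviation for the click string
def pvClick (i j : Int) : String :=
  "click " ++ PySem.Int.toStr i ++ " " ++ PySem.Int.toStr j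

-- nested ranges flattened equal the flat range with divmod
lemma pv_flat (f : Nat → Nat → String) (m p : Nat) :
    (List.range p).flatMap (fun i => (List.range m).map (fun j => f i j))
      = (List.range (p * m)).map (fun k => f (k / m) (k % m)) := by
  induction p with
  | zero => simp
  | succ p ih =>
    rw [List.range_succ, List.flatMap_append, ih, Nat.succ_mul, List.range_add,
        List.map_append]
    simp only [List.flatMap_cons, List.flatMap_nil, List.append_nil, List.map_map]
    congr 1
    apply List.map_congr_left
    intro j hj
    have hjm : j < m := List.mem_range.mp hj
    have hm : 0 < m := by omega
    simp only [Function.comp_apply]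
    have h1 : (p * m + j) / m = p := by
      rw [Nat.add_div hm]
      simp [Nat.mul_div_cancel _ hm, Nat.div_eq_of_lt hjm, Nat.mod_eq_of_lt hjm]
      omega
    have h2 : (p * m + j) % m = j := by
      rw [Nat.add_mod, Nat.mul_mod_left, Nat.mod_eq_of_lt hjm]
      simp [Nat.mod_eq_of_lt hjm]
    rw [h1, h2]

lemma pv_flatMap_single {α β : Type} (f : α → β) (l : List α) :
    l.flatMap (fun x => [f x]) = l.map f := by
  induction l with
  | nil => rfl
  | cons a l ih => simp [List.flatMap_cons, ih]

lemma pv_flatMap_castmap {β : Type} (G : Int → List β) (m : Nat) :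
    ((List.range m).map (fun k : Nat => (k : Int))).flatMap G
      = (List.range m).flatMap (fun i : Nat => G (i : Int)) := by
  rw [List.flatMap_map]

-- A's result in closed form
lemma pv_A_eq (g : Int) :
    get_action_map g = PySem.List.enumerate
      (["left", "right", "up", "down"]
        ++ (List.range (g.toNat * g.toNat)).map
             (fun k : Nat => pvClick ((k / g.toNat : Nat) : Int) ((k % g.toNat : Nat) : Int))
        ++ ["NOP"]) 0 := by
  have hrange : PySem.List.pyRange 0 g 1 = (List.range g.toNat).map (fun k : Nat => (k : Int)) := by
    rw [PySem.List.pyRange_one]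
    simp only [Int.sub_zero, zero_add]
  have hin : ∀ (acc : List String) (i : Int),
      ((List.range g.toNat).map (fun k : Nat => (k : Int))).foldl
        (fun acc2 j => acc2 ++ ["click " ++ PySem.Int.toStr i ++ " " ++ PySem.Int.toStr j]) acc
      = acc ++ (List.range g.toNat).map (fun k : Nat => pvClick i (k : Int)) := by
    intro acc i
    rw [PySem.List.foldl_append_eq_flatMap, pv_flatMap_single, List.map_map]
    rfl
  unfold get_action_map
  simp only [hrange, hin]
  rw [PySem.List.foldl_append_eq_flatMap, pv_flatMap_castmap,
      pv_flat (fun i j => pvClick (i : Int) (j : Int)) g.toNat g.toNat]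

theorem get_action_map_spec : Claim_equal_get_action_map := by
  intro g _ hpre
  unfold Spec_get_action_map
  rw [pv_A_eq]
  have hn : g = ((g.toNat : Int)) := by
    unfold Pre_get_action_map at hpre; omega
  simp only [get_action_map_alt]
  rw [if_neg (by omega), hn]
  simp only [Int.toNat_natCast]
  set m := g.toNat with hm
  set M := m * m with hM
  have hT : (4 + (m : Int) * (m : Int) + 1) = ((4 + M + 1 : Nat) : Int) := by
    rw [hM]; push_cast; ring
  apply List.ext_getElem?
  intro k
  rw [PySem.List.getElem?_enumerate, List.getElem?_map,
      PySem.List.getElem?_pyRange_one]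
  by_cases hk : k < 4 + M + 1
  · rw [if_pos (by rw [Int.sub_zero, hT, Int.toNat_natCast]; exact hk)]
    simp only [Option.map_some, zero_add]
    by_cases hk4 : k < 4
    · rw [List.getElem?_append_left (by simp; omega),
          List.getElem?_append_left (by simp; omega),
          if_pos (by exact_mod_cast hk4)]
      interval_cases k <;> rfl
    · rw [if_neg (by exact_mod_cast hk4)]
      by_cases hkl : k = 4 + M
      · rw [List.getElem?_append_right (by simp; omega)]
        simp only [List.length_append, List.length_map, List.length_range,
          List.length_cons, List.length_nil]
        rw [if_pos (by rw [hT]; omega)]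
        rw [show k - (4 + M) = 0 from by omega]
        rfl
      · rw [List.getElem?_append_left (by simp; omega),
            List.getElem?_append_right (by simp; omega)]
        simp only [List.length_cons, List.length_nil, List.getElem?_map]
        rw [List.getElem?_range (by simp; omega)]
        rw [if_neg (by rw [hT]; intro hcon; exact hkl (by omega))]
        simp only [Option.map_some]
        rw [show ((k : Nat) : Int) - 4 = ((k - 4 : Nat) : Int) from by omega]
        rw [PySem.Int.floordiv_natCast, PySem.Int.mod_natCast]
        rfl
  · rw [if_neg (by rw [Int.sub_zero, hT, Int.toNat_natCast]; omega)]
    rw [List.getElem?_eq_none (by simp; omega)]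
    rfl
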